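-- pv_equiv track=rewrite | github.com/AronAlberts/HR-elections | elections.py | get_values_list
-- ===== SOURCE A (Python) =====
-- def get_values_list(parties_dict, lines_list):
--     ''' Returns list of tuples to be used as values for results dictionary '''
--
--     results_values_list = [
--         tuple(
--             lines_list[i].split(';')
--             ) for i in range(
--                 len(lines_list)
--                 ) if i % (len(parties_dict) + 1) != 0
--         ]
--
--     return results_values_list
-- ===== SOURCE B (Python) =====
-- def get_values_list(parties_dict, lines_list):
--     ''' Returns list of tuples to be used as values for results dictionary '''
--     block = len(parties_dict) + 1
--     results_values_list = []
--     for start in range(0, len(lines_list), block):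
--         for line in lines_list[start + 1:start + block]:
--             results_values_list.append(tuple(line.split(';')))
--     return results_values_list
-- ===== Notes on version B (the rewrite author's own statement) =====
-- stated objective: alternative
-- what changed: Replaces the whole-list index-modulo filter comprehension by a grouped traversal over chunk starts range(0, len, block) that slices each block's body lines_list[start+1:start+block], skipping each header by construction instead of testing i % block per index.
import Mathlib
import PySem

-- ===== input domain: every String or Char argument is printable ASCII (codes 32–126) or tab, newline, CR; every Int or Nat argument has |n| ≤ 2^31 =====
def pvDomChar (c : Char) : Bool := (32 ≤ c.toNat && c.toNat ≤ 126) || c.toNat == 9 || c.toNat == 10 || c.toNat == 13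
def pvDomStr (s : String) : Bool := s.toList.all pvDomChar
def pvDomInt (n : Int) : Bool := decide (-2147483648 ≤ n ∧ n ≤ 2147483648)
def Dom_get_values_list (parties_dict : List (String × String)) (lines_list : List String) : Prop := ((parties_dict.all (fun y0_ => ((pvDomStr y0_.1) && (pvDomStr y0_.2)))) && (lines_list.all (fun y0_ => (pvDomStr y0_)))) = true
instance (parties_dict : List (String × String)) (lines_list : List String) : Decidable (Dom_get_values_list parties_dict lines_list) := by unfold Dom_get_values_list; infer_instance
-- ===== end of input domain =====

-- B replaces A's whole-list index-modulo filter by a chunked traversal (slice each block's body);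
-- objective: alternative (same O(n) cost, different decomposition).

-- line.split(';') — shared by both Pythons; sep ";" ≠ "" so split? is always some
def pvSplitLine (s : String) : List String := (PySem.Str.split? s ";").getD []

-- ===== PORT A =====
def get_values_list (parties_dict : List (String × String)) (lines_list : List String) : List (List String) :=
  (PySem.List.pyRange 0 (PySem.List.len lines_list) 1).foldl
    (fun acc i =>
      if PySem.Int.mod i ((parties_dict.length : Int) + 1) ≠ 0
      then acc ++ [pvSplitLine (PySem.List.pyGetD lines_list i "")]
      else acc) []

-- ===== PORT B =====
def get_values_list_alt (parties_dict : List (String × String)) (lines_list : List String) : List (List String) :=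
  (PySem.List.pyRange 0 (PySem.List.len lines_list) ((parties_dict.length : Int) + 1)).foldl
    (fun acc start =>
      acc ++ (PySem.List.slice lines_list (some (start + 1))
        (some (start + ((parties_dict.length : Int) + 1)))).map pvSplitLine) []

-- ===== PRECONDITION & SPEC =====
def Spec_get_values_list (parties_dict : List (String × String)) (lines_list : List String) (out : List (List String)) : Prop := out = get_values_list_alt parties_dict lines_list
instance (parties_dict : List (String × String)) (lines_list : List String) (out : List (List String)) : Decidable (Spec_get_values_list parties_dict lines_list out) := by unfold Spec_get_values_list; infer_instance

-- ===== CLAIM (what is proved, stated in full; the proofs are below) =====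
def Claim_equal_get_values_list : Prop := ∀ (parties_dict : List (String × String)) (lines_list : List String), Dom_get_values_list parties_dict lines_list → Spec_get_values_list parties_dict lines_list (get_values_list parties_dict lines_list)

-- ===== LEMMAS AND PROOFS =====

-- mapping f over a list is mapping (f ∘ getD) over the index range
lemma pv_map_range_getD {β : Type} (f : String → β) :
    ∀ (ys : List String), (List.range ys.length).map (fun j => f (ys.getD j "")) = ys.map f := by
  intro ys
  induction ys with
  | nil => rfl
  | cons y t ih =>
    simp only [List.length_cons, List.range_succ_eq_map, List.map_cons, List.map_map]
    simp only [List.getD_cons_zero]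
    refine congrArg (f y :: ·) ?_
    calc (List.range t.length).map ((fun j => f ((y :: t).getD j "")) ∘ Nat.succ)
        = (List.range t.length).map (fun j => f (t.getD j "")) := by
          refine List.map_congr_left (fun j _ => ?_)
          simp
      _ = t.map f := ih

-- the first t = min c xs.length indexed reads are exactly xs.take c
lemma pv_range_take (f : String → List String) (xs : List String) (t c : Nat)
    (ht : t = min c xs.length) :
    (List.range t).map (fun j => f (xs.getD j "")) = (xs.take c).map f := by
  have hlen : (xs.take c).length = t := by simp [ht]
  calc (List.range t).map (fun j => f (xs.getD j ""))
      = (List.range (xs.take c).length).map (fun j => f ((xs.take c).getD j "")) := by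
        rw [hlen]
        refine List.map_congr_left (fun j hj => ?_)
        have hj' : j < t := List.mem_range.mp hj
        have hjc : j < c := by omega
        simp [List.getD_eq_getElem?_getD, List.getElem?_take_of_lt hjc]
    _ = (xs.take c).map f := pv_map_range_getD f _

-- the core fact, over Nat: the index-modulo filter equals the chunked traversal
lemma pv_natChunks (B : Nat) (hB : 0 < B) (f : String → List String) :
    ∀ (n : Nat) (ls : List String), ls.length = n →
      ((List.range n).filter (fun k => decide (k % B ≠ 0))).map (fun k => f (ls.getD k ""))
      = (List.range ((n + B - 1) / B)).flatMap
          (fun k => ((ls.drop (B * k + 1)).take (B - 1)).map f) := by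
  intro n
  induction n using Nat.strong_induction_on with
  | _ n ih =>
    intro ls hlen
    rcases Nat.eq_zero_or_pos n with h0 | hpos
    · subst h0
      have h1 : (0 + B - 1) / B = 0 := Nat.div_eq_of_lt (by omega)
      rw [h1]
      simp
    · -- n ≥ 1
      set m : Nat := min B n with hm
      set r : Nat := n - B with hr
      have hmr : m + r = n := by omega
      have hq : (n + B - 1) / B = (n - 1) / B + 1 := by
        have h1 : n + B - 1 = (n - 1) + 1 * B := by omega
        rw [h1, Nat.add_mul_div_right _ _ hB]
      rw [← hmr, List.range_add, List.filter_append, List.map_append, hmr, hq,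
          List.range_succ_eq_map, List.flatMap_cons]
      have hm1 : m = (m - 1) + 1 := by omega
      -- first chunk
      have chunk0 :
          ((List.range m).filter (fun k => decide (k % B ≠ 0))).map (fun k => f (ls.getD k ""))
          = ((ls.drop (B * 0 + 1)).take (B - 1)).map f := by
        rw [hm1, List.range_succ_eq_map, List.filter_cons]
        have hfil' : (List.range (m - 1)).filter ((fun k => decide (k % B ≠ 0)) ∘ Nat.succ)
            = List.range (m - 1) := by
          refine List.filter_eq_self.mpr (fun j hj => ?_)
          have hjm : j < m - 1 := List.mem_range.mp hj
          have hmod : (j + 1) % B = j + 1 := Nat.mod_eq_of_lt (by omega)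
          simp [Function.comp, hmod]
        rw [if_neg (by simp), List.filter_map, hfil', List.map_map]
        have hcomp : ((fun k => f (ls.getD k "")) ∘ Nat.succ)
            = (fun j => f ((ls.drop 1).getD j "")) := by
          funext j
          simp only [Function.comp_apply, List.getD_eq_getElem?_getD, List.getElem?_drop,
            Nat.succ_eq_add_one]
          rw [Nat.add_comm 1 j]
        rw [hcomp]
        have h10 : B * 0 + 1 = 1 := by ring
        rw [h10]
        exact pv_range_take f (ls.drop 1) (m - 1) (B - 1)
          (by simp only [List.length_drop, hlen]; omega)
      rw [chunk0]
      refine congrArg (((ls.drop (B * 0 + 1)).take (B - 1)).map f ++ ·) ?_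
      -- remaining chunks
      rcases Nat.eq_zero_or_pos r with hr0 | hrpos
      · have hn1 : (n - 1) / B = 0 := Nat.div_eq_of_lt (by omega)
        simp [hr0, hn1]
      · have hmB : m = B := by omega
        have hrn : r < n := by omega
        -- left side: shift the index range by B
        rw [List.filter_map, List.map_map]
        have hfilshift : ((fun k => decide (k % B ≠ 0)) ∘ fun x => m + x)
            = (fun x => decide (x % B ≠ 0)) := by
          funext x
          simp [Function.comp, hmB, Nat.add_mod_left]
        have hfunshift : ((fun k => f (ls.getD k "")) ∘ fun x => m + x)
            = (fun x => f ((ls.drop B).getD x "")) := by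
          funext x
          simp only [Function.comp_apply, hmB, List.getD_eq_getElem?_getD, List.getElem?_drop]
        rw [hfilshift, hfunshift, ih r hrn (ls.drop B) (by simp [hlen, hr])]
        -- right side: reindex the chunk starts
        have hcnt : (r + B - 1) / B = (n - 1) / B := by
          have h1 : r + B - 1 = n - 1 := by omega
          rw [h1]
        rw [hcnt, List.flatMap_map]
        refine List.flatMap_congr (fun k _ => ?_)
        simp only [List.drop_drop, Nat.succ_eq_add_one]
        have h4 : B + (B * k + 1) = B * (k + 1) + 1 := by ring
        rw [h4]

-- port A in index-filter normal form
lemma pv_portA_eq (parties_dict : List (String × String)) (lines_list : List String) :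
    get_values_list parties_dict lines_list
    = ((List.range lines_list.length).filter
        (fun k => decide (k % (parties_dict.length + 1) ≠ 0))).map
        (fun k => pvSplitLine (lines_list.getD k "")) := by
  unfold get_values_list
  rw [PySem.List.foldl_append_ite]
  have hlen : PySem.List.len lines_list = (lines_list.length : Int) := rfl
  rw [List.nil_append, hlen, PySem.List.pyRange_one]
  simp only [zero_add, Int.sub_zero, Int.toNat_natCast, List.filter_map, List.map_map]
  have hb : ((parties_dict.length : Int) + 1) = ((parties_dict.length + 1 : Nat) : Int) := by
    push_cast; ring
  have hP : ((fun i : Int => decide (PySem.Int.mod i ((parties_dict.length : Int) + 1) ≠ 0))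
        ∘ (fun k : Nat => (k : Int)))
      = (fun k : Nat => decide (k % (parties_dict.length + 1) ≠ 0)) := by
    funext k
    simp only [Function.comp_apply]
    rw [hb, PySem.Int.mod_natCast]
    simp only [ne_eq, Nat.cast_eq_zero]
  have hF : ((fun i : Int => pvSplitLine (PySem.List.pyGetD lines_list i ""))
        ∘ (fun k : Nat => (k : Int)))
      = (fun k : Nat => pvSplitLine (lines_list.getD k "")) := by
    funext k
    simp [Function.comp, PySem.List.pyGetD_natCast]
  rw [hP, hF]

-- port B in chunked normal form (core, over Nat parameters)
lemma pv_portB_core (B : Nat) (hBpos : 0 < B) (ls : List String) :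
    (PySem.List.pyRange 0 ((ls.length : Nat) : Int) ((B : Nat) : Int)).foldl
      (fun acc start =>
        acc ++ (PySem.List.slice ls (some (start + 1)) (some (start + ((B : Nat) : Int)))).map
          pvSplitLine) []
    = (List.range ((ls.length + B - 1) / B)).flatMap
        (fun k => ((ls.drop (B * k + 1)).take (B - 1)).map pvSplitLine) := by
  rw [PySem.List.foldl_append_eq_flatMap, List.nil_append,
      PySem.List.pyRange_of_pos 0 (ls.length : Int) (by exact_mod_cast hBpos), List.flatMap_map]
  have hcnt : (if (0 : Int) < (ls.length : Int)
        then (((ls.length : Int) - 0 + (B : Int) - 1) / (B : Int)).toNat else 0)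
      = (ls.length + B - 1) / B := by
    rcases Nat.eq_zero_or_pos ls.length with h0 | hpos
    · rw [h0]
      simp only [Nat.cast_zero, lt_self_iff_false, if_false, Nat.zero_add]
      exact (Nat.div_eq_of_lt (by omega)).symm
    · rw [if_pos (by exact_mod_cast hpos)]
      have h1 : (ls.length : Int) - 0 + (B : Int) - 1 = ((ls.length + B - 1 : Nat) : Int) := by
        omega
      rw [h1, ← Int.natCast_div, Int.toNat_natCast]
  rw [hcnt]
  refine List.flatMap_congr (fun k _ => ?_)
  have h2 : (0 : Int) + (B : Int) * (k : Int) + 1 = ((B * k + 1 : Nat) : Int) := by push_cast; ring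
  have h3 : (0 : Int) + (B : Int) * (k : Int) + (B : Int) = ((B * k + B : Nat) : Int) := by
    push_cast; ring
  show (PySem.List.slice ls (some ((0 : Int) + (B : Int) * (k : Int) + 1))
      (some ((0 : Int) + (B : Int) * (k : Int) + (B : Int)))).map pvSplitLine = _
  rw [h2, h3, PySem.List.slice_natCast]
  have h5 : B * k + B - (B * k + 1) = B - 1 := by omega
  rw [h5]

-- port B in chunked normal form
lemma pv_portB_eq (parties_dict : List (String × String)) (lines_list : List String) :
    get_values_list_alt parties_dict lines_list
    = (List.range ((lines_list.length + (parties_dict.length + 1) - 1) / (parties_dict.length + 1))).flatMap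
        (fun k => ((lines_list.drop ((parties_dict.length + 1) * k + 1)).take
          ((parties_dict.length + 1) - 1)).map pvSplitLine) := by
  unfold get_values_list_alt
  have hb : ((parties_dict.length : Int) + 1) = ((parties_dict.length + 1 : Nat) : Int) := by
    push_cast; ring
  have hlen : PySem.List.len lines_list = ((lines_list.length : Nat) : Int) := rfl
  simp only [hlen, hb]
  exact pv_portB_core (parties_dict.length + 1) (Nat.succ_pos _) lines_list

-- ===== VERDICT (by name: the statement is the Claim_ definition above) =====
theorem get_values_list_spec : Claim_equal_get_values_list := by
  intro parties_dict lines_list _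
  show get_values_list parties_dict lines_list = get_values_list_alt parties_dict lines_list
  rw [pv_portA_eq, pv_portB_eq,
    pv_natChunks (parties_dict.length + 1) (Nat.succ_pos _) pvSplitLine
      lines_list.length lines_list rfl]
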